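-- pv_equiv track=rewrite | github.com/ryzeon-dev/sysfetch | src/sysutil.py | __netmaskFromCidr
-- ===== SOURCE A (Python) =====
-- def __bitsToByte(bits):
--     reversed = bits[::-1]
--     byte = 0
--
--     for index, bit in enumerate(reversed):
--         byte += bit * (2 ** index)
--
--     return byte
--
-- def __netmaskFromCidr(cidr):
--     bits = []
--
--     for i in range(32):
--         if i < int(cidr):
--             bits.append(1)
--
--         else:
--             bits.append(0)
--
--     mask = []
--     i = 0
--     while i < 32:
--         mask.append(__bitsToByte(bits[i:i + 8]))
--         i += 8
--
--     return f'{mask[0]}.{mask[1]}.{mask[2]}.{mask[3]}'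
-- ===== SOURCE B (Python) =====
-- def __netmaskFromCidr(cidr):
--     n = int(cidr)
--     octets = []
--     for i in range(4):
--         ones = max(0, min(8, n - 8 * i))
--         octets.append(str((0xFF << (8 - ones)) & 0xFF))
--     return '.'.join(octets)
-- ===== Notes on version B (the rewrite author's own statement) =====
-- stated objective: simpler
-- what changed: B computes each of the four octets directly with clamped per-octet arithmetic ((0xFF << (8 - ones)) & 0xFF) instead of building a 32-entry bit list, slicing it into four 8-bit chunks and summing each chunk with a reversed weighted-sum helper.
import Mathlib
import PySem

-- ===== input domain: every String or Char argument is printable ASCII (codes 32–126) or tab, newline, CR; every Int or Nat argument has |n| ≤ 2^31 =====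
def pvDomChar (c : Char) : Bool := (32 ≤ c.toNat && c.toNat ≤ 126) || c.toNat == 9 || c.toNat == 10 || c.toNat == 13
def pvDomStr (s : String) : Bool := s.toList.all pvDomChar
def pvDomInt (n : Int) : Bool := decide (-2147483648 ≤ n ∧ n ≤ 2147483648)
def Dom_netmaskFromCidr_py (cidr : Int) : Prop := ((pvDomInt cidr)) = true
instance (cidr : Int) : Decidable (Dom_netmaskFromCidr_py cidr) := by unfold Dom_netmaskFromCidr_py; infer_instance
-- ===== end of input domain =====

-- B replaces A's 32-entry bit list + reversed weighted-sum helper by direct per-octet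
-- arithmetic (clamped ones count, shift and mask); objective: simpler.

-- ===== PORT A =====
-- port of __bitsToByte: reverse via bits[::-1], then weighted sum over enumerate
def bitsToByte_py (bits : List Int) : Int :=
  let reversed := (PySem.List.slice? bits none none (-1)).getD []
  (PySem.List.enumerate reversed 0).foldl (fun byte p => byte + p.2 * 2 ^ p.1.toNat) 0

-- the 'while i < 32' loop: mask.append(__bitsToByte(bits[i:i+8])); i += 8
-- fuel only bounds the iteration count (32 ≥ the 4 steps the loop makes); it is a
-- totality guard, not part of the algorithm
def maskLoop_py (bits : List Int) (mask : List Int) (i : Int) : Nat → List Int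
  | 0 => mask
  | fuel + 1 =>
    if i < 32 then
      maskLoop_py bits (mask ++ [bitsToByte_py (PySem.List.slice bits (some i) (some (i + 8)))]) (i + 8) fuel
    else mask

def netmaskFromCidr_py (cidr : Int) : String :=
  let bits := (PySem.List.pyRange 0 32 1).foldl
    (fun acc i => if i < cidr then acc ++ [(1 : Int)] else acc ++ [(0 : Int)]) []
  let mask := maskLoop_py bits [] 0 32
  -- f'{mask[0]}.{mask[1]}.{mask[2]}.{mask[3]}' (mask always has 4 elements, so the
  -- default of pyGetD is never used)
  PySem.Str.join "." [PySem.Int.toStr (PySem.List.pyGetD mask 0 0),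
                      PySem.Int.toStr (PySem.List.pyGetD mask 1 0),
                      PySem.Int.toStr (PySem.List.pyGetD mask 2 0),
                      PySem.Int.toStr (PySem.List.pyGetD mask 3 0)]

-- ===== PORT B =====
def netmaskFromCidr_py_alt (cidr : Int) : String :=
  let octets := (PySem.List.pyRange 0 4 1).foldl
    (fun acc i =>
      let ones := max 0 (min 8 (cidr - 8 * i))
      acc ++ [PySem.Int.toStr (PySem.Int.band (255 <<< (8 - ones).toNat) 255)]) []
  PySem.Str.join "." octets

-- ===== PRECONDITION & SPEC =====
def Spec_netmaskFromCidr_py (cidr : Int) (out : String) : Prop := out = netmaskFromCidr_py_alt cidr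
instance (cidr : Int) (out : String) : Decidable (Spec_netmaskFromCidr_py cidr out) := by unfold Spec_netmaskFromCidr_py; infer_instance

-- ===== CLAIM (what is proved, stated in full; the proofs are below) =====
def Claim_equal_netmaskFromCidr_py : Prop := ∀ (cidr : Int), Dom_netmaskFromCidr_py cidr → Spec_netmaskFromCidr_py cidr (netmaskFromCidr_py cidr)

-- ===== LEMMAS AND PROOFS =====

-- Both ports depend on cidr only through its clamp to [0, 32].
theorem netmaskA_clamp (cidr : Int) :
    netmaskFromCidr_py cidr = netmaskFromCidr_py (max 0 (min 32 cidr)) := by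
  simp only [netmaskFromCidr_py]
  rw [PySem.List.foldl_congr_mem (g := fun acc i =>
        if i < max 0 (min 32 cidr) then acc ++ [(1 : Int)] else acc ++ [(0 : Int)])]
  intro acc x hx
  have hb := (PySem.List.mem_pyRange_one).1 hx
  have : (x < cidr) ↔ (x < max 0 (min 32 cidr)) := by omega
  simp only [this]

theorem netmaskB_clamp (cidr : Int) :
    netmaskFromCidr_py_alt cidr = netmaskFromCidr_py_alt (max 0 (min 32 cidr)) := by
  simp only [netmaskFromCidr_py_alt]
  rw [PySem.List.foldl_congr_mem (g := fun acc i =>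
        acc ++ [PySem.Int.toStr (PySem.Int.band (255 <<< (8 - max 0 (min 8 (max 0 (min 32 cidr) - 8 * i))).toNat) 255)])]
  intro acc x hx
  have hb := (PySem.List.mem_pyRange_one).1 hx
  have : max 0 (min 8 (cidr - 8 * x)) = max 0 (min 8 (max 0 (min 32 cidr) - 8 * x)) := by omega
  simp only [this]

-- ===== VERDICT (by name: the statement is the Claim_ definition above) =====
theorem netmaskFromCidr_py_spec : Claim_equal_netmaskFromCidr_py := by
  intro cidr _
  unfold Spec_netmaskFromCidr_py
  rw [netmaskA_clamp, netmaskB_clamp]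
  have h1 : 0 ≤ max 0 (min 32 cidr) := by omega
  have h2 : max 0 (min 32 cidr) ≤ 32 := by omega
  generalize hm : max 0 (min 32 cidr) = c at h1 h2 ⊢
  interval_cases c <;> (apply String.toList_inj.mp; decide)
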